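-- pv_equiv track=rewrite | github.com/Tyriaax/VA50 | ObjectDetection/Jack.py | in_sight
-- ===== SOURCE A (Python) =====
-- def in_sight(cards, jack, orientations):
--   jack_in_sight = False
--   number_of_people_in_sight = 0
--
--   for card in cards:
--     if card[1][0] in orientations:
--       if card[1][1] == "front":
--         number_of_people_in_sight += 1
--       if jack == card[0]:
--         jack_in_sight = True
--     else:
--       break
--
--   return jack_in_sight, number_of_people_in_sight
-- ===== SOURCE B (Python) =====
-- def in_sight(cards, jack, orientations):
--     # find the length of the visible prefix first, then aggregate over it
--     n = 0
--     while n < len(cards) and cards[n][1][0] in orientations: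
--         n += 1
--     prefix = cards[:n]
--     jack_in_sight = any(card[0] == jack for card in prefix)
--     number_of_people_in_sight = sum(1 for card in prefix if card[1][1] == "front")
--     return jack_in_sight, number_of_people_in_sight
-- ===== Notes on version B (the rewrite author's own statement) =====
-- stated objective: idiomatic
-- what changed: B first computes the visible-prefix length (the takewhile cut), materialises that prefix once, and then derives the two outputs by separate aggregations (any / sum) instead of A's single loop with mutable flags and a manual break.
import Mathlib
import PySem

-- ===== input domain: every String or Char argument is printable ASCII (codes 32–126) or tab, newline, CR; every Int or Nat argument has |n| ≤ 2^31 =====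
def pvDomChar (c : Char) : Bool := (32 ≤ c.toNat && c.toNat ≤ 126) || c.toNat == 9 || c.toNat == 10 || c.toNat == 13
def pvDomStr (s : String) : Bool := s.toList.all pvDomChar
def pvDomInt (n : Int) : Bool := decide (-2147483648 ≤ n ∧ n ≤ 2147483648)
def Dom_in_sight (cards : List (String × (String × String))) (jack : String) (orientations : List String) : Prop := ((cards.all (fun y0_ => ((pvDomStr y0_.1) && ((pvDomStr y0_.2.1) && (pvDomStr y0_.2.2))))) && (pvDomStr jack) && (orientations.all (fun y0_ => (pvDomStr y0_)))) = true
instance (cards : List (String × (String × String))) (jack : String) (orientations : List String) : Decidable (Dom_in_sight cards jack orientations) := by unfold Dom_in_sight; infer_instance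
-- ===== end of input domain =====

-- B computes the visible-prefix length first and then derives the two outputs by
-- separate aggregations over that prefix, instead of A's single loop with a manual break (idiomatic decomposition).
-- ===== PORT A =====
-- the for-loop of A: state (jack_in_sight, number_of_people_in_sight), break on the else branch
def in_sight_go (jack : String) (orientations : List String) :
    List (String × (String × String)) → Bool → Int → Bool × Int
  | [], j, n => (j, n)
  | card :: rest, j, n =>
    if orientations.contains card.2.1 then
      let n' := if card.2.2 == "front" then n + 1 else n
      let j' := if jack == card.1 then true else j
      in_sight_go jack orientations rest j' n'
    else (j, n)

def in_sight (cards : List (String × (String × String))) (jack : String) (orientations : List String) : Bool × Int :=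
  in_sight_go jack orientations cards false 0

-- ===== PORT B =====
-- the while-loop of Source B: length of the visible prefix
def in_sight_cut (orientations : List String) : List (String × (String × String)) → Nat
  | [] => 0
  | card :: rest =>
    if orientations.contains card.2.1 then in_sight_cut orientations rest + 1 else 0

def in_sight_alt (cards : List (String × (String × String))) (jack : String) (orientations : List String) : Bool × Int :=
  let pfx := cards.take (in_sight_cut orientations cards)
  (pfx.any (fun card => card.1 == jack),
   (pfx.countP (fun card => card.2.2 == "front") : Int))

-- ===== PRECONDITION & SPEC =====
def Spec_in_sight (cards : List (String × (String × String))) (jack : String) (orientations : List String) (out : Bool × Int) : Prop := out = in_sight_alt cards jack orientations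
instance (cards : List (String × (String × String))) (jack : String) (orientations : List String) (out : Bool × Int) : Decidable (Spec_in_sight cards jack orientations out) := by unfold Spec_in_sight; infer_instance

-- ===== CLAIM (what is proved, stated in full; the proofs are below) =====
def Claim_equal_in_sight : Prop := ∀ (cards : List (String × (String × String))) (jack : String) (orientations : List String), Dom_in_sight cards jack orientations → Spec_in_sight cards jack orientations (in_sight cards jack orientations)

-- ===== LEMMAS AND PROOFS =====

-- ===== VERDICT (by name: the statement is the Claim_ definition above) =====
lemma in_sight_go_eq (jack : String) (orientations : List String) :
    ∀ (cards : List (String × (String × String))) (j : Bool) (n : Int),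
      in_sight_go jack orientations cards j n =
        ((j || (cards.take (in_sight_cut orientations cards)).any (fun c => c.1 == jack)),
         n + ((cards.take (in_sight_cut orientations cards)).countP (fun c => c.2.2 == "front") : Int))
  | [], j, n => by simp [in_sight_go, in_sight_cut]
  | card :: rest, j, n => by
    by_cases h : orientations.contains card.2.1
    · simp only [in_sight_go, in_sight_cut, h, if_true]
      rw [in_sight_go_eq jack orientations rest]
      simp only [List.take_succ_cons, List.any_cons, List.countP_cons, Prod.mk.injEq]
      constructor
      · have hc : (jack == card.1) = (card.1 == jack) := by
          simp [eq_comm]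
        rw [hc]; cases (card.1 == jack) <;> cases j <;> simp
      · cases (card.2.2 == "front") <;> simp <;> ring
    · simp only [List.contains_eq_mem, decide_eq_true_eq] at h
      simp [in_sight_go, in_sight_cut, h]

theorem in_sight_spec : Claim_equal_in_sight := by
  intro cards jack orientations _
  unfold Spec_in_sight in_sight in_sight_alt
  rw [in_sight_go_eq]
  simp
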